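-- pv_equiv track=rewrite | github.com/Sharonex/grape.nvim | rg_runner.py | separate_args
-- ===== SOURCE A (Python) =====
-- ONLY_ONCE_FLAGS = ["-L", "--line-number", "-l", "--with-filename", "--column", "-c"]
--
-- def separate_args(args: list[str]) -> tuple[list[str], list[str], list[str]]:
--     rg_second_run_options = []
--     rg_first_options = []
--     words_to_find = []
--     encountered_separator = False
--
--     for arg in args:
--         if arg == "--":
--             encountered_separator = True
--             continue
--
--         if encountered_separator:
--             words_to_find += arg.split(" ")
--         elif arg in ONLY_ONCE_FLAGS:
--             rg_first_options.append(arg)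
--         else:
--             rg_first_options.append(arg)
--             rg_second_run_options.append(arg)
--
--     return rg_second_run_options, rg_first_options, words_to_find
-- ===== SOURCE B (Python) =====
-- ONLY_ONCE_FLAGS = ["-L", "--line-number", "-l", "--with-filename", "--column", "-c"]
--
-- def separate_args(args: list[str]) -> tuple[list[str], list[str], list[str]]:
--     # Split once at the first "--", then process prefix and suffix in
--     # independent passes instead of one stateful loop.
--     if "--" in args:
--         idx = args.index("--")
--         prefix = args[:idx]
--         suffix = args[idx + 1:]
--     else:
--         prefix = args
--         suffix = []
--
--     words_to_find = []
--     for arg in suffix: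
--         if arg != "--":
--             words_to_find += arg.split(" ")
--
--     rg_first_options = prefix
--     rg_second_run_options = [a for a in prefix if a not in ONLY_ONCE_FLAGS]
--     return rg_second_run_options, rg_first_options, words_to_find
-- ===== Notes on version B (the rewrite author's own statement) =====
-- stated objective: simpler
-- what changed: Replaces A's single stateful loop with a flag by splitting the list once at the first "--" and then building the three outputs with separate, stateless passes (a filter over the prefix and a word-collecting pass over the suffix).
import Mathlib
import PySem

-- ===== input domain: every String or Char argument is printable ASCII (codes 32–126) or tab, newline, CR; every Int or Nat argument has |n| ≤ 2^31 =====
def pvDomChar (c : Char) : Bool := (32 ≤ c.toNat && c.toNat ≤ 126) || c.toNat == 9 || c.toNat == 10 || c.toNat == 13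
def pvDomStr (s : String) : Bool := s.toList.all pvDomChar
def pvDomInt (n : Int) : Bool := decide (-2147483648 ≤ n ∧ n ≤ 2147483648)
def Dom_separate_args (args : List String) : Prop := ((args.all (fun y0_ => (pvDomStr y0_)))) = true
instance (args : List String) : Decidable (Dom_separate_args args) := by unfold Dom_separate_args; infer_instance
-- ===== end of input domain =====

-- B replaces A's single stateful flag-loop by one split at the first "--" plus
-- independent stateless passes over prefix and suffix (objective: simpler).

def ONLY_ONCE_FLAGS : List String := ["-L", "--line-number", "-l", "--with-filename", "--column", "-c"]

-- ===== PORT A =====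
-- one step of A's for-loop over state (second, first, words, encountered_separator)
def pvAStep (st : List String × List String × List String × Bool) (arg : String) :
    List String × List String × List String × Bool :=
  if arg == "--" then (st.1, st.2.1, st.2.2.1, true)
  else if st.2.2.2 then (st.1, st.2.1, st.2.2.1 ++ (PySem.Str.split? arg " ").getD [], st.2.2.2)
  else if ONLY_ONCE_FLAGS.contains arg then (st.1, st.2.1 ++ [arg], st.2.2.1, st.2.2.2)
  else (st.1 ++ [arg], st.2.1 ++ [arg], st.2.2.1, st.2.2.2)

def separate_args (args : List String) : List String × List String × List String :=
  let st := args.foldl pvAStep ([], [], [], false)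
  (st.1, st.2.1, st.2.2.1)

-- ===== PORT B =====
-- one step of B's words_to_find loop over the suffix
def pvWStep (w : List String) (arg : String) : List String :=
  if arg == "--" then w else w ++ (PySem.Str.split? arg " ").getD []

def separate_args_alt (args : List String) : List String × List String × List String :=
  let ps : List String × List String :=
    match PySem.List.index? args "--" with
    | some idx => (PySem.List.slice args none (some (idx : Int)),
                   PySem.List.slice args (some ((idx : Int) + 1)) none)
    | none => (args, [])
  let words := ps.2.foldl pvWStep []
  (ps.1.filter (fun a => !(ONLY_ONCE_FLAGS.contains a)), ps.1, words)

-- ===== PRECONDITION & SPEC =====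
def Spec_separate_args (args : List String) (out : List String × List String × List String) : Prop := out = separate_args_alt args
instance (args : List String) (out : List String × List String × List String) : Decidable (Spec_separate_args args out) := by unfold Spec_separate_args; infer_instance

-- ===== CLAIM (what is proved, stated in full; the proofs are below) =====
def Claim_equal_separate_args : Prop := ∀ (args : List String), Dom_separate_args args → Spec_separate_args args (separate_args args)

-- ===== LEMMAS AND PROOFS =====

-- after the separator, A's loop only appends words
theorem pvA_post (l : List String) (s f w : List String) :
    l.foldl pvAStep (s, f, w, true) = (s, f, l.foldl pvWStep w, true) := by
  induction l generalizing w with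
  | nil => simp
  | cons a t ih =>
    simp only [List.foldl_cons, pvAStep, pvWStep]
    by_cases h : a = "--" <;> simp [h, ih]

-- A's loop, characterised by takeWhile/dropWhile around the first "--"
theorem pvA_main (args : List String) (s f w : List String) :
    args.foldl pvAStep (s, f, w, false) =
      (s ++ (args.takeWhile (fun a => a != "--")).filter (fun a => !(ONLY_ONCE_FLAGS.contains a)),
       f ++ args.takeWhile (fun a => a != "--"),
       ((args.dropWhile (fun a => a != "--")).drop 1).foldl pvWStep w,
       args.contains "--") := by
  induction args generalizing s f w with
  | nil => simp
  | cons a t ih =>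
    by_cases h : a = "--"
    · subst h
      simp only [List.foldl_cons, pvAStep]
      simp [pvA_post]
    · simp only [List.foldl_cons, pvAStep]
      by_cases hf : a ∈ ONLY_ONCE_FLAGS <;>
        simp [h, Ne.symm h, hf, ih]

theorem pv_main_eq (args : List String) : separate_args args = separate_args_alt args := by
  unfold separate_args separate_args_alt
  rcases hidx : PySem.List.index? args "--" with _ | idx
  · have hn : "--" ∉ args := (PySem.List.index?_eq_none_iff args "--").mp hidx
    have hall : ∀ x ∈ args, (x != "--") = true := by
      intro x hx
      simp only [bne_iff_ne, ne_eq]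
      exact fun he => hn (he ▸ hx)
    simp [pvA_main, List.takeWhile_eq_self_iff.mpr hall,
      List.dropWhile_eq_nil_iff.mpr hall]
  · obtain ⟨pre, suf, hargs, hlen, hpre⟩ := (PySem.List.index?_eq_some_iff args "--" idx).mp hidx
    have h1 : PySem.List.slice args none (some (idx : Int)) = args.take idx :=
      PySem.List.slice_to_natCast args idx
    have h2 : PySem.List.slice args (some ((idx : Int) + 1)) none = args.drop (idx + 1) := by
      have := PySem.List.slice_from_natCast args (idx + 1)
      simpa using this
    have htake : args.take idx = pre := by
      subst hargs hlen; exact List.take_left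
    have hdrop : args.drop (idx + 1) = suf := by
      subst hargs hlen
      rw [show pre.length + 1 = (pre ++ ["--"]).length by simp]
      rw [show pre ++ "--" :: suf = (pre ++ ["--"]) ++ suf by simp]
      exact List.drop_left
    have hall : ∀ x ∈ pre, (x != "--") = true := by
      intro x hx
      simp only [bne_iff_ne, ne_eq]
      exact fun he => hpre (he ▸ hx)
    subst hargs
    simp [pvA_main, h1, h2, htake, hdrop, pvAStep, pvA_post,
      List.takeWhile_eq_self_iff.mpr hall, List.dropWhile_eq_nil_iff.mpr hall]

-- ===== VERDICT (by name: the statement is the Claim_ definition above) =====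
theorem separate_args_spec : Claim_equal_separate_args := by
  intro args _
  exact pv_main_eq args
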